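-- pv_equiv track=rewrite | github.com/Leticia-Emily-Moraes/obi-fesa | 2011/nivel-2/fase-1/caca-ao-tesouro.py | tesouro_encontrado
-- ===== SOURCE A (Python) =====
-- def tesouro_encontrado(k, n, pistas):
--     # Inicializa o mapa com zeros
--     mapa = [[0 for i in range(n)] for j in range(n)]
--
--     # Define os locais das pistas
--     for x, y, d in pistas:
--         mapa[x][y] = d
--     # Pistas = [(x, y, d), (x, y, d)]
--     for x, y, d in pistas:
--         # Define quais são as coordenadas dos possíveis tesouros
--         for i in range(max(0, x - d), min(n, x + d + 1)):
--             for j in range(max(0, y - d), min(n, y + d + 1)):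
--                 # Descobrir os possíveis tesouros
--                 if abs(i - x) + abs(j - y) == d:
--                     if (i, j, mapa[i][j]) not in pistas:
--                         mapa[i][j] += 1
--
--     # Verifica se há apenas um tesouro e anota suas coordenadas
--     cont = 0
--     for i in range(n):
--         for j in range(n):
--             if mapa[i][j] > 1:
--                 if (i, j, mapa[i][j]) not in pistas:
--                     cont += 1
--                     tesouro = (i, j)
--     if cont == 1:
--         return (f"{tesouro[0]} {tesouro[1]}")
--     else:
--         return "-1 -1"
-- ===== SOURCE B (Python) =====
-- def tesouro_encontrado(k, n, pistas):
--     mapa = [[0] * n for _ in range(n)]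
--     for x, y, d in pistas:
--         mapa[x][y] = d
--     pset = set(pistas)
--     # walk only the diamond perimeter of each clue instead of scanning its whole bounding box
--     for x, y, d in pistas:
--         for dx in range(-d, d + 1):
--             i = x + dx
--             if 0 <= i < n:
--                 dy = d - abs(dx)
--                 for j in ([y] if dy == 0 else [y - dy, y + dy]):
--                     if 0 <= j < n and (i, j, mapa[i][j]) not in pset:
--                         mapa[i][j] += 1
--     candidatos = [(i, j)
--                   for i, linha in enumerate(mapa)
--                   for j, v in enumerate(linha)
--                   if v > 1 and (i, j, v) not in pset]
--     if len(candidatos) == 1: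
--         return f"{candidatos[0][0]} {candidatos[0][1]}"
--     return "-1 -1"
-- ===== Notes on version B (the rewrite author's own statement) =====
-- stated objective: faster
-- what changed: Per clue, B walks only the O(d) cells on the diamond perimeter |i-x|+|j-y|=d instead of A's O(d^2) bounding-box scan with a distance test, replaces every O(k) 'in pistas' list membership by an O(1) set lookup, and collects the final candidates with a single enumerate-comprehension instead of a count-and-last index scan; intended as faster asymptotically - a timing run measured B 1.9-2.4x faster at the sizes where both programs finished but could not confirm the ratio at the largest size (A timed out there, and a re-run read 1.15x).
import Mathlib
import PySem

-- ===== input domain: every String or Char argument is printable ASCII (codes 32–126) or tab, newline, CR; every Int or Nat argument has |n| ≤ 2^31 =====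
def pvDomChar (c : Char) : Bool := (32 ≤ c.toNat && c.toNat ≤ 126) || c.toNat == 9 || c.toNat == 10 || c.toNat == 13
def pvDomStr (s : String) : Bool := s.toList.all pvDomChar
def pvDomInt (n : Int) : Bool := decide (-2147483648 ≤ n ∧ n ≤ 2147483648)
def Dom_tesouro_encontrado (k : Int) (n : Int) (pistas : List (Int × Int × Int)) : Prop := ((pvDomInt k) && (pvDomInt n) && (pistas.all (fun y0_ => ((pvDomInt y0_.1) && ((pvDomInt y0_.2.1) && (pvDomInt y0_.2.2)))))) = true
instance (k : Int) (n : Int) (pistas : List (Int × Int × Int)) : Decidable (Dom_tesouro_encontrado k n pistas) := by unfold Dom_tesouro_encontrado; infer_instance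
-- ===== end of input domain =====

-- B walks only the diamond perimeter of each clue (instead of A's bounding-box scan) and tests
-- clue membership against a set; intended as faster: a timing run measured 1.9-2.4x at the
-- sizes where both finished, but could not confirm it at the largest size.

-- mapa[i][j] read: Python indexing (negative index wraps); exact wherever Python returns
def pvMget (m : List (List Int)) (i j : Int) : Int :=
  PySem.List.pyGetD (PySem.List.pyGetD m i []) j 0

-- mapa[i][j] = v: Python indexing with wraparound; exact for in-range (possibly negative)
-- indices, i.e. wherever Python does not raise (out-of-range writes are excluded by Pre_)
def pvMset (m : List (List Int)) (i j : Int) (v : Int) : List (List Int) :=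
  let row := PySem.List.pyGetD m i []
  m.set (if i < 0 then i + m.length else i).toNat
    (row.set (if j < 0 then j + row.length else j).toNat v)

-- ===== PORT A =====
def tesouro_encontrado (k : Int) (n : Int) (pistas : List (Int × Int × Int)) : String :=
  let mapa0 : List (List Int) :=
    (PySem.List.pyRange 0 n 1).map (fun _ => (PySem.List.pyRange 0 n 1).map (fun _ => (0 : Int)))
  let mapa1 := pistas.foldl (fun m p => pvMset m p.1 p.2.1 p.2.2) mapa0
  let mapa2 := pistas.foldl (fun m p =>
    (PySem.List.pyRange (max 0 (p.1 - p.2.2)) (min n (p.1 + p.2.2 + 1)) 1).foldl (fun m i =>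
      (PySem.List.pyRange (max 0 (p.2.1 - p.2.2)) (min n (p.2.1 + p.2.2 + 1)) 1).foldl (fun m j =>
        if |i - p.1| + |j - p.2.1| = p.2.2 then
          if (i, j, pvMget m i j) ∉ pistas then pvMset m i j (pvMget m i j + 1) else m
        else m) m) m) mapa1
  let res := (PySem.List.pyRange 0 n 1).foldl (fun acc i =>
      (PySem.List.pyRange 0 n 1).foldl (fun acc j =>
        if pvMget mapa2 i j > 1 then
          if (i, j, pvMget mapa2 i j) ∉ pistas then (acc.1 + 1, (i, j)) else acc
        else acc) acc) ((0 : Int), ((0 : Int), (0 : Int)))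
  if res.1 = 1 then PySem.Int.toStr res.2.1 ++ " " ++ PySem.Int.toStr res.2.2
  else "-1 -1"

-- ===== PORT B =====
def tesouro_encontrado_alt (k : Int) (n : Int) (pistas : List (Int × Int × Int)) : String :=
  let mapa0 : List (List Int) :=
    (PySem.List.pyRange 0 n 1).map (fun _ => List.replicate n.toNat (0 : Int))
  let mapa1 := pistas.foldl (fun m p => pvMset m p.1 p.2.1 p.2.2) mapa0
  let pset := PySem.Set.ofList pistas
  let mapa2 := pistas.foldl (fun m p =>
    (PySem.List.pyRange (-p.2.2) (p.2.2 + 1) 1).foldl (fun m dx =>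
      let i := p.1 + dx
      if 0 ≤ i ∧ i < n then
        let dy := p.2.2 - |dx|
        (if dy = 0 then [p.2.1] else [p.2.1 - dy, p.2.1 + dy]).foldl (fun m j =>
          if (0 ≤ j ∧ j < n) ∧ (i, j, pvMget m i j) ∉ pset then
            pvMset m i j (pvMget m i j + 1) else m) m
      else m) m) mapa1
  let candidatos := (PySem.List.enumerate mapa2 0).flatMap (fun q =>
    ((PySem.List.enumerate q.2 0).filter
        (fun r => decide (r.2 > 1 ∧ (q.1, r.1, r.2) ∉ pset))).map (fun r => (q.1, r.1)))
  if candidatos.length = 1 then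
    let c := PySem.List.pyGetD candidatos 0 ((0 : Int), (0 : Int))
    PySem.Int.toStr c.1 ++ " " ++ PySem.Int.toStr c.2
  else "-1 -1"

-- ===== PRECONDITION & SPEC =====
-- Pre_ excludes exactly the inputs where Python A raises IndexError: a clue whose x- or
-- y-coordinate is outside [-n, n) (mapa[x][y] = d fails there).  On every other input A returns.
def Pre_tesouro_encontrado (k : Int) (n : Int) (pistas : List (Int × Int × Int)) : Prop :=
  ∀ p ∈ pistas, -n ≤ p.1 ∧ p.1 < n ∧ -n ≤ p.2.1 ∧ p.2.1 < n
instance (k : Int) (n : Int) (pistas : List (Int × Int × Int)) : Decidable (Pre_tesouro_encontrado k n pistas) := by unfold Pre_tesouro_encontrado; infer_instance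

def pvWitness_tesouro_encontrado : Int × Int × (List (Int × Int × Int)) :=
  (2, 5, [(0, 2, 2), (4, 2, 2)])

def Spec_tesouro_encontrado (k : Int) (n : Int) (pistas : List (Int × Int × Int)) (out : String) : Prop := out = tesouro_encontrado_alt k n pistas
instance (k : Int) (n : Int) (pistas : List (Int × Int × Int)) (out : String) : Decidable (Spec_tesouro_encontrado k n pistas out) := by unfold Spec_tesouro_encontrado; infer_instance

-- ===== CLAIM (what is proved, stated in full; the proofs are below) =====
def Claim_equal_tesouro_encontrado : Prop := ∀ (k : Int) (n : Int) (pistas : List (Int × Int × Int)), Dom_tesouro_encontrado k n pistas → Pre_tesouro_encontrado k n pistas → Spec_tesouro_encontrado k n pistas (tesouro_encontrado k n pistas)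

-- ===== LEMMAS AND PROOFS =====

-- two strictly increasing integer lists with the same members are equal
theorem pvSortedExt {l1 l2 : List Int} (h1 : l1.Pairwise (· < ·)) (h2 : l2.Pairwise (· < ·))
    (h : ∀ a, a ∈ l1 ↔ a ∈ l2) : l1 = l2 :=
  List.Perm.eq_of_pairwise (fun _ _ _ _ hab hba => absurd hba (lt_asymm hab)) h1 h2
    ((List.perm_ext_iff_of_nodup (h1.imp ne_of_lt) (h2.imp ne_of_lt)).mpr h)

-- a clipped range is the full range filtered to the clip window
theorem pvRangeClip (a b lo hi : Int) :
    PySem.List.pyRange (max a lo) (min b hi) 1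
      = (PySem.List.pyRange lo hi 1).filter (fun t => decide (a ≤ t ∧ t < b)) := by
  refine pvSortedExt (PySem.List.pairwise_lt_pyRange_one ..)
    ((PySem.List.pairwise_lt_pyRange_one ..).filter _) (fun t => ?_)
  simp only [List.mem_filter, PySem.List.mem_pyRange_one, decide_eq_true_eq]
  omega

-- range(-d, d+1) shifted by x is range(x-d, x+d+1)
theorem pvRangeShift (x d : Int) :
    (PySem.List.pyRange (-d) (d + 1) 1).map (fun dx => x + dx)
      = PySem.List.pyRange (x - d) (x + d + 1) 1 := by
  simp only [PySem.List.pyRange_one, List.map_map]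
  have h : (d + 1 - -d) = (x + d + 1 - (x - d)) := by ring
  rw [h]
  exact List.map_congr_left (fun kk _ => by simp [Function.comp]; ring)

theorem pvRangeToNat (n : Int) :
    PySem.List.pyRange 0 ((n.toNat : Nat) : Int) 1 = PySem.List.pyRange 0 n 1 := by
  simp only [PySem.List.pyRange_one]
  have e : (((n.toNat : Nat) : Int) - 0).toNat = (n - 0).toNat := by omega
  rw [e]

-- a loop body guarded by a state-independent test is a loop over the filtered list
theorem pvFoldlGuard {α : Type} (l : List Int) (p : Int → Prop) [DecidablePred p]
    (G : α → Int → α) (m : α) :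
    l.foldl (fun m i => if p i then G m i else m) m
      = (l.filter (fun i => decide (p i))).foldl G m := by
  rw [List.foldl_filter]
  congr 1
  funext a b
  simp

-- 'if p j and q(state, j)' with state-independent p: filter p outside, keep q inside
theorem pvFoldlFilterAnd {α : Type} (l : List Int) (p : Int → Prop) [DecidablePred p]
    (q : α → Int → Prop) [∀ m j, Decidable (q m j)] (f : α → Int → α) (m : α) :
    l.foldl (fun m j => if p j ∧ q m j then f m j else m) m
      = (l.filter (fun j => decide (p j))).foldl (fun m j => if q m j then f m j else m) m := by
  induction l generalizing m with
  | nil => rfl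
  | cons a l ih =>
    by_cases hp : p a
    · by_cases hq : q m a <;> simp [hp, hq, ih]
    · simp [hp, ih]

-- count-and-remember-last loop over a list of cells
theorem pvCountLast (L : List (Int × Int)) (c0 : Int) (t0 : Int × Int) :
    L.foldl (fun acc c => ((acc.1 + 1 : Int), c)) (c0, t0)
      = (c0 + (L.length : Int), L.getLastD t0) := by
  induction L generalizing c0 t0 with
  | nil => simp
  | cons c L ih =>
    rw [List.foldl_cons, ih, List.getLastD_cons]
    simp [Prod.ext_iff]
    omega

-- the j's of the clipped row scan that lie on clue (x,y,d)'s diamond are exactly the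
-- in-grid members of the two-point perimeter list
theorem pvRow (n x y d i : Int) (hlo : x - d ≤ i) (hhi : i < x + d + 1) :
    (PySem.List.pyRange (max 0 (y - d)) (min n (y + d + 1)) 1).filter
        (fun j => decide (|i - x| + |j - y| = d))
      = (if d - |i - x| = 0 then [y] else [y - (d - |i - x|), y + (d - |i - x|)]).filter
          (fun j => decide (0 ≤ j ∧ j < n)) := by
  have hu := abs_nonneg (i - x)
  have hu1 : |i - x| ≤ d := by rcases abs_cases (i - x) with ⟨e, _⟩ | ⟨e, _⟩ <;> omega
  refine pvSortedExt ((PySem.List.pairwise_lt_pyRange_one ..).filter _) ?_ (fun a => ?_)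
  · split
    · exact List.Pairwise.filter _ (by simp)
    · exact List.Pairwise.filter _ (by simp; omega)
  · simp only [List.mem_filter, PySem.List.mem_pyRange_one, decide_eq_true_eq]
    rcases abs_cases (a - y) with ⟨e, he⟩ | ⟨e, he⟩ <;> rw [e] <;> split <;>
      simp only [List.mem_cons, List.not_mem_nil, or_false] <;> omega

def pvShape (N : Nat) (m : List (List Int)) : Prop :=
  m.length = N ∧ ∀ r ∈ m, r.length = N

-- Python m[i] for an in-range negative index
theorem pvGetDneg {α : Type} (m : List α) (d : α) (i : Int) (h0 : -(m.length : Int) ≤ i)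
    (h1 : i < 0) : PySem.List.pyGetD m i d = m[(i + m.length).toNat]'(by omega) := by
  have e : m.length - (-i).toNat = (i + (m.length : Int)).toNat := by omega
  simp only [PySem.List.pyGetD, PySem.List.pyGet?, PySem.List.pyIdx?, if_neg (not_le.mpr h1),
    if_pos h0, e]
  simp [List.getElem?_eq_getElem (by omega : (i + (m.length : Int)).toNat < m.length)]

theorem pvGetDpos {α : Type} (m : List α) (d : α) (i : Int) (h0 : 0 ≤ i) (h1 : i < m.length) :
    PySem.List.pyGetD m i d = m[i.toNat]'(by omega) :=
  PySem.List.pyGetD_eq_getElem m d h0 (by exact_mod_cast h1)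

theorem pvShape_mset (N : Nat) (m : List (List Int)) (i j v : Int)
    (hi : -(m.length : Int) ≤ i) (h : pvShape N m) : pvShape N (pvMset m i j v) := by
  obtain ⟨h1, h2⟩ := h
  refine ⟨by simpa [pvMset] using h1, fun r hr => ?_⟩
  simp only [pvMset] at hr
  by_cases hlt : (if i < 0 then i + (m.length : Int) else i).toNat < m.length
  · rcases List.mem_or_eq_of_mem_set hr with hr | rfl
    · exact h2 r hr
    · rw [List.length_set]
      by_cases hneg : i < 0
      · rw [pvGetDneg m [] i hi hneg]
        have := h2 _ (List.getElem_mem (l := m) (n := (i + m.length).toNat) (by omega))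
        simpa [hneg] using this
      · have hpos : i < (m.length : Int) := by simp [hneg] at hlt; omega
        rw [pvGetDpos m [] i (by omega) hpos]
        exact h2 _ (List.getElem_mem _)
  · rw [List.set_eq_of_length_le (by omega)] at hr
    exact h2 r hr

theorem pvShape_foldl {β : Type} (N : Nat) (l : List β) (f : List (List Int) → β → List (List Int))
    (h : ∀ m x, x ∈ l → pvShape N m → pvShape N (f m x)) (m : List (List Int)) (hm : pvShape N m) :
    pvShape N (l.foldl f m) := by
  induction l generalizing m with
  | nil => exact hm
  | cons a l ih => exact ih (fun m x hx => h m x (List.mem_cons_of_mem a hx)) _ (h m a (List.mem_cons_self ..) hm)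

-- per-clue loop bodies of A and B coincide (B's perimeter walk visits exactly A's cells, in order)
theorem pvBody (n : Int) (pistas : List (Int × Int × Int)) (p : Int × Int × Int)
    (m : List (List Int)) :
    (PySem.List.pyRange (max 0 (p.1 - p.2.2)) (min n (p.1 + p.2.2 + 1)) 1).foldl (fun m i =>
      (PySem.List.pyRange (max 0 (p.2.1 - p.2.2)) (min n (p.2.1 + p.2.2 + 1)) 1).foldl (fun m j =>
        if |i - p.1| + |j - p.2.1| = p.2.2 then
          if (i, j, pvMget m i j) ∉ pistas then pvMset m i j (pvMget m i j + 1) else m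
        else m) m) m
    = (PySem.List.pyRange (-p.2.2) (p.2.2 + 1) 1).foldl (fun m dx =>
      let i := p.1 + dx
      if 0 ≤ i ∧ i < n then
        let dy := p.2.2 - |dx|
        (if dy = 0 then [p.2.1] else [p.2.1 - dy, p.2.1 + dy]).foldl (fun m j =>
          if (0 ≤ j ∧ j < n) ∧ (i, j, pvMget m i j) ∉ PySem.Set.ofList pistas then
            pvMset m i j (pvMget m i j + 1) else m) m
      else m) m := by
  obtain ⟨x, y, d⟩ := p
  trans ((PySem.List.pyRange (x - d) (x + d + 1) 1).filter
      (fun i => decide (0 ≤ i ∧ i < n))).foldl (fun m i =>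
        ((PySem.List.pyRange (max 0 (y - d)) (min n (y + d + 1)) 1).filter
            (fun j => decide (|i - x| + |j - y| = d))).foldl (fun m j =>
          if (i, j, pvMget m i j) ∉ pistas then pvMset m i j (pvMget m i j + 1) else m) m) m
  · rw [pvRangeClip 0 n (x - d) (x + d + 1)]
    exact PySem.List.foldl_congr_mem _ _ _ _ (fun m0 i _ => pvFoldlGuard _ _ _ m0)
  · symm
    calc (PySem.List.pyRange (-d) (d + 1) 1).foldl (fun m dx =>
            let i := x + dx
            if 0 ≤ i ∧ i < n then
              let dy := d - |dx|
              (if dy = 0 then [y] else [y - dy, y + dy]).foldl (fun m j =>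
                if (0 ≤ j ∧ j < n) ∧ (i, j, pvMget m i j) ∉ PySem.Set.ofList pistas then
                  pvMset m i j (pvMget m i j + 1) else m) m
            else m) m
        = (PySem.List.pyRange (-d) (d + 1) 1).foldl (fun m dx =>
            (fun (m : List (List Int)) (i : Int) =>
              if 0 ≤ i ∧ i < n then
                (if d - |i - x| = 0 then [y] else [y - (d - |i - x|), y + (d - |i - x|)]).foldl
                  (fun m j =>
                    if (0 ≤ j ∧ j < n) ∧ (i, j, pvMget m i j) ∉ PySem.Set.ofList pistas then
                      pvMset m i j (pvMget m i j + 1) else m) m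
              else m) m (x + dx)) m := by
          refine PySem.List.foldl_congr_mem _ _ _ _ (fun m0 dx _ => ?_)
          simp only [add_sub_cancel_left]
      _ = ((PySem.List.pyRange (-d) (d + 1) 1).map (fun dx => x + dx)).foldl
            (fun (m : List (List Int)) (i : Int) =>
              if 0 ≤ i ∧ i < n then
                (if d - |i - x| = 0 then [y] else [y - (d - |i - x|), y + (d - |i - x|)]).foldl
                  (fun m j =>
                    if (0 ≤ j ∧ j < n) ∧ (i, j, pvMget m i j) ∉ PySem.Set.ofList pistas then
                      pvMset m i j (pvMget m i j + 1) else m) m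
              else m) m := by rw [List.foldl_map]
      _ = ((PySem.List.pyRange (x - d) (x + d + 1) 1).filter
            (fun i => decide (0 ≤ i ∧ i < n))).foldl
            (fun (m : List (List Int)) (i : Int) =>
              (if d - |i - x| = 0 then [y] else [y - (d - |i - x|), y + (d - |i - x|)]).foldl
                (fun m j =>
                  if (0 ≤ j ∧ j < n) ∧ (i, j, pvMget m i j) ∉ PySem.Set.ofList pistas then
                    pvMset m i j (pvMget m i j + 1) else m) m) m := by
          rw [pvRangeShift x d]
          exact pvFoldlGuard _ _ _ m
      _ = ((PySem.List.pyRange (x - d) (x + d + 1) 1).filter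
            (fun i => decide (0 ≤ i ∧ i < n))).foldl (fun m i =>
              ((PySem.List.pyRange (max 0 (y - d)) (min n (y + d + 1)) 1).filter
                  (fun j => decide (|i - x| + |j - y| = d))).foldl (fun m j =>
                if (i, j, pvMget m i j) ∉ pistas then pvMset m i j (pvMget m i j + 1) else m) m) m := by
          refine PySem.List.foldl_congr_mem _ _ _ _ (fun m0 i hi => ?_)
          have hb : x - d ≤ i ∧ i < x + d + 1 := by
            have := List.mem_of_mem_filter hi
            rwa [PySem.List.mem_pyRange_one] at this
          rw [pvFoldlFilterAnd, ← pvRow n x y d i hb.1 hb.2]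
          simp only [PySem.Set.mem_ofList]

-- B's candidate comprehension over the final grid is A's filtered cell list
theorem pvCand (n : Int) (pistas : List (Int × Int × Int)) (M : List (List Int))
    (hM : pvShape n.toNat M) :
    (PySem.List.enumerate M 0).flatMap (fun q =>
      ((PySem.List.enumerate q.2 0).filter
          (fun r => decide (r.2 > 1 ∧ (q.1, r.1, r.2) ∉ PySem.Set.ofList pistas))).map
        (fun r => (q.1, r.1)))
    = (PySem.List.pyRange 0 n 1).flatMap (fun i =>
        ((PySem.List.pyRange 0 n 1).filter
            (fun j => decide (pvMget M i j > 1 ∧ (i, j, pvMget M i j) ∉ pistas))).map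
          (fun j => ((i, j) : Int × Int))) := by
  obtain ⟨hlen, hrows⟩ := hM
  have hlenM : PySem.List.len M = ((n.toNat : Nat) : Int) := by simp [hlen]
  rw [PySem.List.enumerate_eq_map_pyRange M [], List.flatMap_map, hlenM, pvRangeToNat]
  refine List.flatMap_congr (fun i hi => ?_)
  rw [PySem.List.mem_pyRange_one] at hi
  have hiM : i < (M.length : Int) := by omega
  have hrowE : PySem.List.pyGetD M i [] = M[i.toNat]'(by omega) := pvGetDpos M [] i hi.1 hiM
  have hrl : PySem.List.len (PySem.List.pyGetD M i []) = ((n.toNat : Nat) : Int) := by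
    simp [hrowE, hrows _ (List.getElem_mem _)]
  rw [PySem.List.enumerate_eq_map_pyRange (PySem.List.pyGetD M i []) 0, hrl, pvRangeToNat,
    List.filter_map, List.map_map]
  simp only [pvMget, PySem.Set.mem_ofList, Function.comp_def]
  rfl

-- ===== VERDICT (by name: the statement is the Claim_ definition above) =====
-- count-and-last form of A's final double scan over the grid
theorem pvScan (n : Int) (pistas : List (Int × Int × Int)) (M : List (List Int)) :
    (PySem.List.pyRange 0 n 1).foldl (fun acc i =>
        (PySem.List.pyRange 0 n 1).foldl (fun acc j =>
          if pvMget M i j > 1 then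
            if (i, j, pvMget M i j) ∉ pistas then ((acc.1 + 1 : Int), (i, j)) else acc
          else acc) acc) ((0 : Int), ((0 : Int), (0 : Int)))
    = ((0 : Int) + (((PySem.List.pyRange 0 n 1).flatMap (fun i =>
          ((PySem.List.pyRange 0 n 1).filter
              (fun j => decide (pvMget M i j > 1 ∧ (i, j, pvMget M i j) ∉ pistas))).map
            (fun j => ((i, j) : Int × Int)))).length : Int),
        ((PySem.List.pyRange 0 n 1).flatMap (fun i =>
          ((PySem.List.pyRange 0 n 1).filter
              (fun j => decide (pvMget M i j > 1 ∧ (i, j, pvMget M i j) ∉ pistas))).map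
            (fun j => ((i, j) : Int × Int)))).getLastD (0, 0)) := by
  rw [← pvCountLast]
  rw [List.foldl_flatMap]
  refine PySem.List.foldl_congr_mem _ _ _ _ (fun acc i _ => ?_)
  rw [List.foldl_map]
  rw [← pvFoldlGuard _ (fun j => pvMget M i j > 1 ∧ (i, j, pvMget M i j) ∉ pistas)
        (fun acc j => ((acc.1 + 1 : Int), (i, j))) acc]
  refine PySem.List.foldl_congr_mem _ _ _ _ (fun acc2 j _ => ?_)
  by_cases h1 : pvMget M i j > 1 <;> by_cases h2 : (i, j, pvMget M i j) ∉ pistas <;>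
    simp [h1, h2]

-- shape of the grid after both update phases
theorem pvShapeA (n : Int) (pistas : List (Int × Int × Int))
    (hpre : ∀ p ∈ pistas, -n ≤ p.1 ∧ p.1 < n ∧ -n ≤ p.2.1 ∧ p.2.1 < n)
    (m : List (List Int)) (hm : pvShape n.toNat m) :
    pvShape n.toNat (pistas.foldl (fun m p =>
      (PySem.List.pyRange (max 0 (p.1 - p.2.2)) (min n (p.1 + p.2.2 + 1)) 1).foldl (fun m i =>
        (PySem.List.pyRange (max 0 (p.2.1 - p.2.2)) (min n (p.2.1 + p.2.2 + 1)) 1).foldl (fun m j =>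
          if |i - p.1| + |j - p.2.1| = p.2.2 then
            if (i, j, pvMget m i j) ∉ pistas then pvMset m i j (pvMget m i j + 1) else m
          else m) m) m)
      (pistas.foldl (fun m p => pvMset m p.1 p.2.1 p.2.2) m)) := by
  have h1 : pvShape n.toNat (pistas.foldl (fun m p => pvMset m p.1 p.2.1 p.2.2) m) := by
    refine pvShape_foldl _ _ _ (fun m0 p hp hm0 => ?_) m hm
    refine pvShape_mset _ _ _ _ _ ?_ hm0
    have := hpre p hp
    have := hm0.1
    omega
  refine pvShape_foldl _ _ _ (fun m0 p _ hm0 => ?_) _ h1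
  refine pvShape_foldl _ _ _ (fun m1 i hi hm1 => ?_) m0 hm0
  refine pvShape_foldl _ _ _ (fun m2 j hj hm2 => ?_) m1 hm1
  split_ifs with hc1 hc2
  all_goals first
    | exact hm2
    | (refine pvShape_mset _ _ _ _ _ ?_ hm2
       rw [PySem.List.mem_pyRange_one] at hi
       omega)

-- the two result formattings agree: count-and-last on the left, length-and-head on the right
theorem pvWrap (L : List (Int × Int)) :
    (if ((0 : Int) + (L.length : Int), L.getLastD ((0 : Int), (0 : Int))).1 = 1 then
      PySem.Int.toStr ((0 : Int) + (L.length : Int), L.getLastD ((0 : Int), (0 : Int))).2.1 ++ " " ++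
        PySem.Int.toStr ((0 : Int) + (L.length : Int), L.getLastD ((0 : Int), (0 : Int))).2.2
    else "-1 -1")
    = (if L.length = 1 then
        PySem.Int.toStr (PySem.List.pyGetD L 0 ((0 : Int), (0 : Int))).1 ++ " " ++
          PySem.Int.toStr (PySem.List.pyGetD L 0 ((0 : Int), (0 : Int))).2
      else "-1 -1") := by
  by_cases h : L.length = 1
  · obtain ⟨c, rfl⟩ := List.length_eq_one_iff.mp h
    simp [PySem.List.pyGetD, PySem.List.pyGet?, PySem.List.pyIdx?]
  · simp [h]

-- ===== VERDICT (by name: the statement is the Claim_ definition above) =====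
theorem tesouro_encontrado_spec : Claim_equal_tesouro_encontrado := by
  intro k n pistas _dom hpre
  unfold Spec_tesouro_encontrado tesouro_encontrado tesouro_encontrado_alt
  have hmap0 : (List.replicate n.toNat (0 : Int))
      = (PySem.List.pyRange 0 n 1).map (fun _ => (0 : Int)) := by
    rw [List.map_const']
    congr 1
    simp [PySem.List.length_pyRange_one]
  simp only [hmap0]
  have hshape0 : pvShape n.toNat
      ((PySem.List.pyRange 0 n 1).map (fun _ => (PySem.List.pyRange 0 n 1).map (fun _ => (0 : Int)))) := by
    constructor
    · simp [PySem.List.length_pyRange_one]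
    · intro r hr
      obtain ⟨a, _, rfl⟩ := List.mem_map.mp hr
      simp [PySem.List.length_pyRange_one]
  have hclue : ∀ m : List (List Int), pistas.foldl (fun m p =>
      (PySem.List.pyRange (max 0 (p.1 - p.2.2)) (min n (p.1 + p.2.2 + 1)) 1).foldl (fun m i =>
        (PySem.List.pyRange (max 0 (p.2.1 - p.2.2)) (min n (p.2.1 + p.2.2 + 1)) 1).foldl (fun m j =>
          if |i - p.1| + |j - p.2.1| = p.2.2 then
            if (i, j, pvMget m i j) ∉ pistas then pvMset m i j (pvMget m i j + 1) else m
          else m) m) m) m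
      = pistas.foldl (fun m p =>
        (PySem.List.pyRange (-p.2.2) (p.2.2 + 1) 1).foldl (fun m dx =>
          let i := p.1 + dx
          if 0 ≤ i ∧ i < n then
            let dy := p.2.2 - |dx|
            (if dy = 0 then [p.2.1] else [p.2.1 - dy, p.2.1 + dy]).foldl (fun m j =>
              if (0 ≤ j ∧ j < n) ∧ (i, j, pvMget m i j) ∉ PySem.Set.ofList pistas then
                pvMset m i j (pvMget m i j + 1) else m) m
          else m) m) m :=
    fun m => PySem.List.foldl_congr_mem _ _ _ _ (fun m0 p _ => pvBody n pistas p m0)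
  simp only [← hclue]
  rw [pvCand n pistas _ (pvShapeA n pistas hpre _ hshape0)]
  rw [pvScan n pistas]
  exact pvWrap _
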